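-- pv_equiv track=rewrite | github.com/DatabaseStratum/py-stratum-cli | pystratum/DocBlockReflection.py | __remove_leading_empty_lines
-- ===== SOURCE A (Python) =====
-- def __remove_leading_empty_lines(lines):
--     """
--     Removes leading empty lines from a list of lines.
--
--     :param list[str] lines: The lines.
--     """
--     tmp = list()
--     empty = True
--     for i in range(0, len(lines)):
--         empty = empty and lines[i] == ''
--         if not empty:
--             tmp.append(lines[i])
--
--     return tmp
-- ===== SOURCE B (Python) =====
-- def __remove_leading_empty_lines(lines):
--     """
--     Removes leading empty lines from a list of lines.
--
--     :param list[str] lines: The lines.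
--     """
--     for i, line in enumerate(lines):
--         if line != '':
--             return lines[i:]
--     return []
-- ===== Notes on version B (the rewrite author's own statement) =====
-- stated objective: idiomatic
-- what changed: Replaces the flag-and-accumulate loop with an index-then-slice decomposition: find the first non-empty line and return the tail slice lines[i:], or the empty list when every line is empty.
import Mathlib
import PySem

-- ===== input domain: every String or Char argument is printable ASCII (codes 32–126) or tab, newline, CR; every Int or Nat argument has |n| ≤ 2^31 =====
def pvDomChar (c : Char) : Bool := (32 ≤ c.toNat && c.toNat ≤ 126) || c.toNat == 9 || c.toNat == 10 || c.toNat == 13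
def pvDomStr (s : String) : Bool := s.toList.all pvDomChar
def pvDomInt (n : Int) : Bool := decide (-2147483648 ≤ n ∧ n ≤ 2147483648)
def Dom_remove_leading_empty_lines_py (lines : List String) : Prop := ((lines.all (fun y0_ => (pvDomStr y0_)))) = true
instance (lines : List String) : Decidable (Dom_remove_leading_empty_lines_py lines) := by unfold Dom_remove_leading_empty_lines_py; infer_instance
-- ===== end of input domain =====

-- B (index-then-slice) replaces A's flag-and-accumulate loop; same values, same cost.

-- ===== PORT A =====
-- A: for each line, empty := empty and line == ''; if not empty, append the line.
def remove_leading_empty_lines_py (lines : List String) : List String :=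
  (lines.foldl
    (fun (s : Bool × List String) line =>
      let empty := s.1 && (line == "")
      (empty, if !empty then s.2 ++ [line] else s.2))
    (true, [])).2

-- ===== PORT B =====
-- B: find the index of the first non-empty line, return lines[i:]; [] if none.
def remove_leading_empty_lines_py_alt (lines : List String) : List String :=
  match lines.findIdx? (fun line => line != "") with
  | some i => lines.drop i
  | none => []

-- ===== PRECONDITION & SPEC =====
def Spec_remove_leading_empty_lines_py (lines : List String) (out : List String) : Prop := out = remove_leading_empty_lines_py_alt lines
instance (lines : List String) (out : List String) : Decidable (Spec_remove_leading_empty_lines_py lines out) := by unfold Spec_remove_leading_empty_lines_py; infer_instance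

-- ===== CLAIM (what is proved, stated in full; the proofs are below) =====
def Claim_equal_remove_leading_empty_lines_py : Prop := ∀ (lines : List String), Dom_remove_leading_empty_lines_py lines → Spec_remove_leading_empty_lines_py lines (remove_leading_empty_lines_py lines)

-- ===== LEMMAS AND PROOFS =====

-- A's loop body as a named function, for the lemmas.
def pvStepA (s : Bool × List String) (line : String) : Bool × List String :=
  let empty := s.1 && (line == "")
  (empty, if !empty then s.2 ++ [line] else s.2)

-- Once the flag is false it stays false and every remaining line is appended.
theorem pvFoldA_false (ls : List String) (acc : List String) :
    ls.foldl pvStepA (false, acc) = (false, acc ++ ls) := by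
  induction ls generalizing acc with
  | nil => simp
  | cons l t ih => simp [pvStepA, ih, List.append_assoc]

-- With the flag still true, the fold appends exactly B's result.
theorem pvFoldA_true (ls : List String) (acc : List String) :
    (ls.foldl pvStepA (true, acc)).2 = acc ++ remove_leading_empty_lines_py_alt ls := by
  induction ls generalizing acc with
  | nil => simp [remove_leading_empty_lines_py_alt]
  | cons l t ih =>
    by_cases h : l = ""
    · subst h
      have : pvStepA (true, acc) "" = (true, acc) := by simp [pvStepA]
      rw [List.foldl_cons, this, ih]
      simp [remove_leading_empty_lines_py_alt, List.findIdx?_cons]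
      cases hfi : t.findIdx? (fun line => line != "") with
      | none => simp
      | some i => simp
    · have hstep : pvStepA (true, acc) l = (false, acc ++ [l]) := by
        simp [pvStepA, h]
      rw [List.foldl_cons, hstep, pvFoldA_false]
      simp [remove_leading_empty_lines_py_alt, List.findIdx?_cons, h]

-- ===== VERDICT (by name: the statement is the Claim_ definition above) =====
theorem remove_leading_empty_lines_py_spec : Claim_equal_remove_leading_empty_lines_py := by
  intro lines _
  unfold Spec_remove_leading_empty_lines_py remove_leading_empty_lines_py
  change (List.foldl pvStepA (true, []) lines).2 = _
  simpa using pvFoldA_true lines []
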